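-- pv_equiv track=rewrite | github.com/AmaanSiddiqi/resumeTailor | generate.py | build_skills_block
-- ===== SOURCE A (Python) =====
-- def build_skills_block(skills):
--     # Flatten to a simple list of skill strings
--     top = [b["bullets"][0] for b in skills]
--
--     # Define your categories & the master lists
--     categories = {
--         "Languages":      ["Python","Java","Kotlin","C","MATLAB","JavaScript","TypeScript"],
--         "ML/DL":          ["PyTorch","TensorFlow","PointNet++","CLIP","ONNX","Optuna","Scikit-learn","LangChain"],
--         "Audio/DSP":      ["TorchAudio","Pedalboard","Librosa","FFT","Real-Time Audio"],
--         "Backend":        ["Node.js","Express","MongoDB","Docker","AWS","REST APIs"],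
--         "Frontend":       ["React","Tailwind CSS","Chakra UI","Mapbox GL JS"],
--         "Tools":          ["Git","Linux","VS Code","Jupyter","Figma"]
--     }
--
--     # Build the single LaTeX item
--     lines = ["\\item \\small{"]
--     for cat, pool in categories.items():
--         chosen = [s for s in top if s in pool]
--         if chosen:
--             # join with comma+space, end with \\ for linebreak
--             lines.append(f"  \\textbf{{{cat}:}} {', '.join(chosen)} \\\\")
--     lines.append("}")
--
--     # wrap in resumeSubHeadingListStart/End is in the template
--     return "\n".join(lines)
-- ===== SOURCE B (Python) =====
-- def build_skills_block(skills):
--     # Flatten to a simple list of skill strings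
--     top = [b["bullets"][0] for b in skills]
--
--     categories = {
--         "Languages":      ["Python","Java","Kotlin","C","MATLAB","JavaScript","TypeScript"],
--         "ML/DL":          ["PyTorch","TensorFlow","PointNet++","CLIP","ONNX","Optuna","Scikit-learn","LangChain"],
--         "Audio/DSP":      ["TorchAudio","Pedalboard","Librosa","FFT","Real-Time Audio"],
--         "Backend":        ["Node.js","Express","MongoDB","Docker","AWS","REST APIs"],
--         "Frontend":       ["React","Tailwind CSS","Chakra UI","Mapbox GL JS"],
--         "Tools":          ["Git","Linux","VS Code","Jupyter","Figma"]
--     }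
--
--     # Invert the table once: skill -> its category (pools are disjoint, so unambiguous)
--     index = {s: cat for cat, pool in categories.items() for s in pool}
--
--     # One pass over top, appending each recognised skill to its category's group
--     groups = {cat: [] for cat in categories}
--     for s in top:
--         cat = index.get(s)
--         if cat is not None:
--             groups[cat].append(s)
--
--     body = ["  \\textbf{%s:} %s \\\\" % (cat, ", ".join(g))
--             for cat, g in groups.items() if g]
--     return "\n".join(["\\item \\small{"] + body + ["}"])
-- ===== Notes on version B (the rewrite author's own statement) =====
-- stated objective: alternative
-- what changed: B inverts the category table once into a skill-to-category index dict and makes a single grouping pass over the flattened list, then emits the lines from the groups dict's items, instead of A's separate membership-filter scan of the whole list for each category; correct because the hard-coded pools are disjoint.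
import Mathlib
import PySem

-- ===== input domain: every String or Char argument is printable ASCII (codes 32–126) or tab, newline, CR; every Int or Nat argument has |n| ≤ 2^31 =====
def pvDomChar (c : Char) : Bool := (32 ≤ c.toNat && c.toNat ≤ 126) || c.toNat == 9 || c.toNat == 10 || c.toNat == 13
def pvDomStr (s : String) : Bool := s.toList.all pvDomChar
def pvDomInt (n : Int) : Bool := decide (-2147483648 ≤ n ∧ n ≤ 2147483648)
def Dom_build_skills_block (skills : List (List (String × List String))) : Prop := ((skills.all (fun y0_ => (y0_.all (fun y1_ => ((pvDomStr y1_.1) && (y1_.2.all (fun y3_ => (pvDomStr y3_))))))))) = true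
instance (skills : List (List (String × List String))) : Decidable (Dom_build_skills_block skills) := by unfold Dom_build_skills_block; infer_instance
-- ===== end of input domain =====

-- B inverts the category table once into a skill→category index dict and groups the
-- flattened list in ONE pass, emitting the lines from the groups dict's items, instead
-- of A's per-category filtering scan of the whole list (the pools are disjoint).

-- the hard-coded categories table, shared data of both ports
def pvCategories : List (String × List String) :=
  [("Languages",  ["Python","Java","Kotlin","C","MATLAB","JavaScript","TypeScript"]),
   ("ML/DL",      ["PyTorch","TensorFlow","PointNet++","CLIP","ONNX","Optuna","Scikit-learn","LangChain"]),
   ("Audio/DSP",  ["TorchAudio","Pedalboard","Librosa","FFT","Real-Time Audio"]),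
   ("Backend",    ["Node.js","Express","MongoDB","Docker","AWS","REST APIs"]),
   ("Frontend",   ["React","Tailwind CSS","Chakra UI","Mapbox GL JS"]),
   ("Tools",      ["Git","Linux","VS Code","Jupyter","Figma"])]

-- ===== PORT A =====
def build_skills_block (skills : List (List (String × List String))) : String :=
  -- top = [b["bullets"][0] for b in skills]  (total form; Pre_ excludes the raising inputs)
  let top := skills.map (fun b => (PySem.List.pyGet? (PySem.Dict.getD (PySem.Dict.ofList b) "bullets" []) 0).getD "")
  let lines := ["\\item \\small{"]
  let lines := pvCategories.foldl (fun lines cp =>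
    let chosen := top.filter (fun s => cp.2.contains s)
    if chosen ≠ [] then
      lines ++ ["  \\textbf{" ++ cp.1 ++ ":} " ++ PySem.Str.join ", " chosen ++ " \\\\"]
    else lines) lines
  let lines := lines ++ ["}"]
  PySem.Str.join "\n" lines

-- ===== PORT B =====
-- index = {s: cat for cat, pool in categories.items() for s in pool}
def pvIndex : PySem.Dict String String :=
  pvCategories.foldl (fun d cp => cp.2.foldl (fun d s => d.insert s cp.1) d) PySem.Dict.empty

def build_skills_block_alt (skills : List (List (String × List String))) : String :=
  let top := skills.map (fun b => (PySem.List.pyGet? (PySem.Dict.getD (PySem.Dict.ofList b) "bullets" []) 0).getD "")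
  -- groups = {cat: [] for cat in categories}; one pass: groups[index[s]].append(s)
  let groups0 : PySem.Dict String (List String) :=
    pvCategories.foldl (fun d cp => d.insert cp.1 []) PySem.Dict.empty
  let groups := top.foldl (fun g s =>
      match pvIndex.get? s with
      | some cat => g.modify cat [] (· ++ [s])
      | none => g) groups0
  let body := (groups.items.filter (fun p => !p.2.isEmpty)).map
      (fun p => "  \\textbf{" ++ p.1 ++ ":} " ++ PySem.Str.join ", " p.2 ++ " \\\\")
  PySem.Str.join "\n" (["\\item \\small{"] ++ body ++ ["}"])

-- ===== PRECONDITION & SPEC =====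
-- A raises (KeyError/IndexError) when some entry lacks a "bullets" key or its list is empty;
-- Pre_ admits exactly the inputs on which A returns.
def Pre_build_skills_block (skills : List (List (String × List String))) : Prop :=
  ∀ b ∈ skills, PySem.Dict.getD (PySem.Dict.ofList b) "bullets" [] ≠ []
instance (skills : List (List (String × List String))) : Decidable (Pre_build_skills_block skills) := by
  unfold Pre_build_skills_block; infer_instance

def pvWitness_build_skills_block : (List (List (String × List String))) :=
  [[("bullets", ["Python"])]]

def Spec_build_skills_block (skills : List (List (String × List String))) (out : String) : Prop := out = build_skills_block_alt skills
instance (skills : List (List (String × List String))) (out : String) : Decidable (Spec_build_skills_block skills out) := by unfold Spec_build_skills_block; infer_instance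

-- ===== CLAIM (what is proved, stated in full; the proofs are below) =====
def Claim_equal_build_skills_block : Prop := ∀ (skills : List (List (String × List String))), Dom_build_skills_block skills → Pre_build_skills_block skills → Spec_build_skills_block skills (build_skills_block skills)

-- ===== LEMMAS AND PROOFS =====

-- the six category names, in table order
def pvCats : List String := ["Languages", "ML/DL", "Audio/DSP", "Backend", "Frontend", "Tools"]

-- the index dict's items, fully evaluated (insert appends fresh keys, so pool order is kept)
def pvIndexItems : List (String × String) :=
  [("Python", "Languages"), ("Java", "Languages"), ("Kotlin", "Languages"), ("C", "Languages"),
   ("MATLAB", "Languages"), ("JavaScript", "Languages"), ("TypeScript", "Languages"),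
   ("PyTorch", "ML/DL"), ("TensorFlow", "ML/DL"), ("PointNet++", "ML/DL"), ("CLIP", "ML/DL"),
   ("ONNX", "ML/DL"), ("Optuna", "ML/DL"), ("Scikit-learn", "ML/DL"), ("LangChain", "ML/DL"),
   ("TorchAudio", "Audio/DSP"), ("Pedalboard", "Audio/DSP"), ("Librosa", "Audio/DSP"),
   ("FFT", "Audio/DSP"), ("Real-Time Audio", "Audio/DSP"),
   ("Node.js", "Backend"), ("Express", "Backend"), ("MongoDB", "Backend"), ("Docker", "Backend"),
   ("AWS", "Backend"), ("REST APIs", "Backend"),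
   ("React", "Frontend"), ("Tailwind CSS", "Frontend"), ("Chakra UI", "Frontend"), ("Mapbox GL JS", "Frontend"),
   ("Git", "Tools"), ("Linux", "Tools"), ("VS Code", "Tools"), ("Jupyter", "Tools"), ("Figma", "Tools")]

set_option maxRecDepth 4000 in
lemma pv_index_eval : pvIndex = PySem.Dict.mk pvIndexItems := by rfl

-- any category the index maps to is one of the six
lemma pv_index_mem {s cat : String} (h : pvIndex.get? s = some cat) : cat ∈ pvCats := by
  rw [pv_index_eval] at h
  by_cases hs : s ∈ pvIndexItems.map Prod.fst
  · simp only [pvIndexItems, List.map_cons, List.map_nil, List.mem_cons,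
      List.not_mem_nil, or_false] at hs
    rcases hs with rfl|rfl|rfl|rfl|rfl|rfl|rfl|rfl|rfl|rfl|rfl|rfl|rfl|rfl|rfl|rfl|rfl|rfl|rfl|rfl|rfl|rfl|rfl|rfl|rfl|rfl|rfl|rfl|rfl|rfl|rfl|rfl|rfl|rfl|rfl <;>
      simp_all [pvIndexItems, pvCats, PySem.Dict.get?_mk_cons]
  · rw [((PySem.Dict.get?_eq_none_iff_not_mem_keys _ _).mpr (by simpa using hs))] at h
    cases h

-- per category: the index lookup test coincides with A's pool-membership test
lemma pv_index_pool {cat : String} {pool : List String} (hm : (cat, pool) ∈ pvCategories) :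
    (fun s => pvIndex.get? s == some cat) = (fun s => pool.contains s) := by
  funext s
  rw [pv_index_eval]
  simp only [pvCategories, List.mem_cons, List.not_mem_nil, or_false, Prod.mk.injEq] at hm
  by_cases hs : s ∈ pvIndexItems.map Prod.fst
  · simp only [pvIndexItems, List.map_cons, List.map_nil, List.mem_cons,
      List.not_mem_nil, or_false] at hs
    rcases hm with ⟨rfl, rfl⟩|⟨rfl, rfl⟩|⟨rfl, rfl⟩|⟨rfl, rfl⟩|⟨rfl, rfl⟩|⟨rfl, rfl⟩ <;>
      rcases hs with rfl|rfl|rfl|rfl|rfl|rfl|rfl|rfl|rfl|rfl|rfl|rfl|rfl|rfl|rfl|rfl|rfl|rfl|rfl|rfl|rfl|rfl|rfl|rfl|rfl|rfl|rfl|rfl|rfl|rfl|rfl|rfl|rfl|rfl|rfl <;> decide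
  · rw [((PySem.Dict.get?_eq_none_iff_not_mem_keys _ _).mpr (by simpa using hs))]
    simp only [pvIndexItems, List.map_cons, List.map_nil, List.mem_cons,
      List.not_mem_nil, or_false] at hs
    push_neg at hs
    rcases hm with ⟨rfl, rfl⟩|⟨rfl, rfl⟩|⟨rfl, rfl⟩|⟨rfl, rfl⟩|⟨rfl, rfl⟩|⟨rfl, rfl⟩ <;>
      simp_all

-- the grouping pass appends, per category, exactly the matching skills in top order
lemma pv_groups_getD (top : List String) (g : PySem.Dict String (List String)) (cat : String) :
    (top.foldl (fun g s =>
        match pvIndex.get? s with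
        | some c => g.modify c [] (· ++ [s])
        | none => g) g).getD cat []
      = g.getD cat [] ++ top.filter (fun s => pvIndex.get? s == some cat) := by
  induction top generalizing g with
  | nil => simp
  | cons s t ih =>
    rw [List.foldl_cons, List.filter_cons]
    cases h : pvIndex.get? s with
    | none => simp [h, ih]
    | some c =>
      by_cases hc : cat = c
      · subst hc
        simp [h, ih, PySem.Dict.getD_modify]
      · simp [h, ih, PySem.Dict.getD_modify, hc, Ne.symm hc]

-- the grouping pass never adds a key (every index target is already a key)
lemma pv_groups_keys (top : List String) (g : PySem.Dict String (List String))
    (hk : ∀ c ∈ pvCats, g.contains c = true) :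
    (top.foldl (fun g s =>
        match pvIndex.get? s with
        | some c => g.modify c [] (· ++ [s])
        | none => g) g).keys = g.keys := by
  induction top generalizing g with
  | nil => rfl
  | cons s t ih =>
    rw [List.foldl_cons]
    cases h : pvIndex.get? s with
    | none => simp only [h]; exact ih g hk
    | some c =>
      have hc : g.contains c = true := hk c (pv_index_mem h)
      simp only [h]
      rw [ih, PySem.Dict.keys_modify, PySem.Dict.keys_insert_of_contains _ _ hc]
      intro c' hc'
      rw [PySem.Dict.contains_modify, hk c' hc', Bool.or_true]

-- the finished groups dict, item by item: A's six filtered lists in category order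
lemma pv_groups_items (top : List String) :
    (top.foldl (fun g s =>
        match pvIndex.get? s with
        | some cat => g.modify cat [] (· ++ [s])
        | none => g)
      (pvCategories.foldl (fun d cp => d.insert cp.1 []) PySem.Dict.empty)).items
    = pvCategories.map (fun cp => (cp.1, top.filter (fun s => cp.2.contains s))) := by
  have hg0 : (pvCategories.foldl (fun d cp => d.insert cp.1 []) PySem.Dict.empty :
      PySem.Dict String (List String)) = PySem.Dict.mk
      [("Languages", []), ("ML/DL", []), ("Audio/DSP", []), ("Backend", []), ("Frontend", []), ("Tools", [])] := by
    decide
  rw [hg0]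
  have hkeys := pv_groups_keys top (PySem.Dict.mk
      [("Languages", []), ("ML/DL", []), ("Audio/DSP", []), ("Backend", []), ("Frontend", []), ("Tools", [])])
      (by decide)
  rw [PySem.Dict.items_eq_map_keys _ (by rw [hkeys]; decide) [], hkeys]
  have hgetD := pv_groups_getD top (PySem.Dict.mk
      [("Languages", []), ("ML/DL", []), ("Audio/DSP", []), ("Backend", []), ("Frontend", []), ("Tools", [])])
  simp only [PySem.Dict.keys_mk, List.map_cons, List.map_nil, hgetD]
  rw [pv_index_pool (cat := "Languages")
        (pool := ["Python","Java","Kotlin","C","MATLAB","JavaScript","TypeScript"]) (by simp [pvCategories]),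
      pv_index_pool (cat := "ML/DL")
        (pool := ["PyTorch","TensorFlow","PointNet++","CLIP","ONNX","Optuna","Scikit-learn","LangChain"]) (by simp [pvCategories]),
      pv_index_pool (cat := "Audio/DSP")
        (pool := ["TorchAudio","Pedalboard","Librosa","FFT","Real-Time Audio"]) (by simp [pvCategories]),
      pv_index_pool (cat := "Backend")
        (pool := ["Node.js","Express","MongoDB","Docker","AWS","REST APIs"]) (by simp [pvCategories]),
      pv_index_pool (cat := "Frontend")
        (pool := ["React","Tailwind CSS","Chakra UI","Mapbox GL JS"]) (by simp [pvCategories]),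
      pv_index_pool (cat := "Tools")
        (pool := ["Git","Linux","VS Code","Jupyter","Figma"]) (by simp [pvCategories])]
  simp [pvCategories]
  all_goals decide

-- A's append-if loop over any table = header ++ the nonempty groups' lines
lemma pv_emit (l : List (String × List String)) (top : List String) (acc : List String) :
    l.foldl (fun lines cp =>
        let chosen := top.filter (fun s => cp.2.contains s)
        if chosen ≠ [] then
          lines ++ ["  \\textbf{" ++ cp.1 ++ ":} " ++ PySem.Str.join ", " chosen ++ " \\\\"]
        else lines) acc
    = acc ++ ((l.map (fun cp => (cp.1, top.filter (fun s => cp.2.contains s)))).filter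
        (fun p => !p.2.isEmpty)).map
        (fun p => "  \\textbf{" ++ p.1 ++ ":} " ++ PySem.Str.join ", " p.2 ++ " \\\\") := by
  induction l generalizing acc with
  | nil => simp
  | cons cp t ih =>
    rw [List.foldl_cons, List.map_cons, List.filter_cons, ih]
    split_ifs with h1 h2 h2 <;> simp_all

-- ===== VERDICT (by name: the statement is the Claim_ definition above) =====
theorem build_skills_block_spec : Claim_equal_build_skills_block := by
  intro skills _ _
  unfold Spec_build_skills_block build_skills_block build_skills_block_alt
  dsimp only
  generalize (skills.map (fun b =>
    (PySem.List.pyGet? (PySem.Dict.getD (PySem.Dict.ofList b) "bullets" []) 0).getD "")) = top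
  rw [pv_groups_items top, pv_emit pvCategories top]
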